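-- pv_equiv track=rewrite | github.com/syedomar1/boxity | boxity_backend/api/index.py | _split_packed
-- ===== SOURCE A (Python) =====
-- from typing import Any, Dict, List, Optional, Tuple
--
-- IMAGE_PACK_DELIMITER = "||"
--
-- def _split_packed(source: Any) -> List[str]:
--     if source is None:
--         return []
--     if isinstance(source, list):
--         out: List[str] = []
--         for s in source:
--             if s is None:
--                 continue
--             v = str(s).strip()
--             if v:
--                 out.append(v)
--         return out
--     raw = str(source).strip()
--     if not raw:
--         return []
--     if IMAGE_PACK_DELIMITER in raw:
--         return [s.strip() for s in raw.split(IMAGE_PACK_DELIMITER) if str(s).strip()]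
--     return [raw]
-- ===== SOURCE B (Python) =====
-- from typing import Any, List
--
-- IMAGE_PACK_DELIMITER = "||"
--
--
-- def _split_packed(source: Any) -> List[str]:
--     if source is None:
--         return []
--     if isinstance(source, list):
--         return [v for v in (str(s).strip() for s in source if s is not None) if v]
--     # Single-pass character scanner: walk the stripped text once, cutting at the
--     # delimiter by hand with a character buffer; no membership test, no str.split.
--     text = str(source).strip()
--     out: List[str] = []
--     buf: List[str] = []
--     i = 0
--     n = len(text)
--     while i < n:
--         if text.startswith(IMAGE_PACK_DELIMITER, i):
--             v = "".join(buf).strip()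
--             if v:
--                 out.append(v)
--             buf = []
--             i += len(IMAGE_PACK_DELIMITER)
--         else:
--             buf.append(text[i])
--             i += 1
--     v = "".join(buf).strip()
--     if v:
--         out.append(v)
--     return out
-- ===== Notes on version B (the rewrite author's own statement) =====
-- stated objective: alternative
-- what changed: B replaces A's delimiter-membership test plus library split plus per-piece strip/filter comprehension with a single hand-written character scan over the stripped text (buffer, manual delimiter cut, strip-and-flush of non-empty tokens); it trades the C-level split for an explicit one-pass state machine, so it is not faster in CPython.
import Mathlib
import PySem

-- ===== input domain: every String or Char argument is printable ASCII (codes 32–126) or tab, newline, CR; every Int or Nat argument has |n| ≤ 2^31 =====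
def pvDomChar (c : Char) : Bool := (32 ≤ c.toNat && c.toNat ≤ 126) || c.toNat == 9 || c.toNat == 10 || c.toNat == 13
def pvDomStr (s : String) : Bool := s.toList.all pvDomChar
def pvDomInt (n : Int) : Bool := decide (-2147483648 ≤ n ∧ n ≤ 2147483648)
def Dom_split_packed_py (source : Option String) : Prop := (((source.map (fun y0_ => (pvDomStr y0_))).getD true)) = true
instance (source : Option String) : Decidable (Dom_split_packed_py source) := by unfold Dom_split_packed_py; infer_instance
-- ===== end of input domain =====

-- B replaces A's delimiter-membership test + library split + per-piece comprehension with one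
-- hand-written character scan over the stripped text (buffer, manual '||' cut, strip-and-flush);
-- objective: alternative (same cost, different mechanism).
-- (Under the Option String signature A's isinstance-list branch is unreachable and is not ported.)

-- ===== PORT A =====
def split_packed_py (source : Option String) : List String :=
  match source with
  | none => []                                  -- if source is None: return []
  | some src =>
    -- raw = str(source).strip()  (inlined below)
    if PySem.Str.strip src = "" then []         -- if not raw: return []
    else if PySem.Str.isIn "||" (PySem.Str.strip src) then   -- if IMAGE_PACK_DELIMITER in raw:
      -- [s.strip() for s in raw.split(IMAGE_PACK_DELIMITER) if str(s).strip()]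
      (((PySem.Str.split? (PySem.Str.strip src) "||").getD []).filter
          (fun s => PySem.Str.strip s != "")).map PySem.Str.strip
    else [PySem.Str.strip src]                  -- return [raw]

-- ===== PORT B =====
-- flush: v = "".join(buf).strip(); if v: out.append(v); buf = []
def pvFlushB (buf : List Char) (out : List String) : List String :=
  let v := PySem.Str.strip (String.ofList buf)
  if v = "" then out else out ++ [v]

-- the while loop of Source B: walk the text, cut by hand at "||", else push the char onto buf
def pvScanB : List Char → List Char → List String → List String
  | [], buf, out => pvFlushB buf out            -- loop ended: final flush, return out
  | c :: rest, buf, out =>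
    if ("||".toList).isPrefixOf (c :: rest) then     -- text.startswith("||", i)
      pvScanB (rest.drop 1) [] (pvFlushB buf out)    -- flush; i += 2
    else
      pvScanB rest (buf ++ [c]) out                  -- buf.append(text[i]); i += 1
  termination_by l _ _ => l.length
  decreasing_by
  · simp only [List.length_cons, List.length_drop]; omega
  · simp

def split_packed_py_alt (source : Option String) : List String :=
  match source with
  | none => []                                  -- None -> []
  | some src =>
    -- text = str(source).strip(); then the scanner over its characters
    pvScanB (PySem.Str.strip src).toList [] []

-- ===== PRECONDITION & SPEC =====
def Spec_split_packed_py (source : Option String) (out : List String) : Prop := out = split_packed_py_alt source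
instance (source : Option String) (out : List String) : Decidable (Spec_split_packed_py source out) := by unfold Spec_split_packed_py; infer_instance

-- ===== CLAIM (what is proved, stated in full; the proofs are below) =====
def Claim_equal_split_packed_py : Prop := ∀ (source : Option String), Dom_split_packed_py source → Spec_split_packed_py source (split_packed_py source)

-- ===== LEMMAS AND PROOFS =====

-- stripped, "-filtered string pieces: the common normal form both programs reduce to
def pvClean (ps : List (List Char)) : List String :=
  (ps.map (fun p => PySem.Str.strip (String.ofList p))).filter (fun v => v != "")

theorem pvClean_append (a b : List (List Char)) :
    pvClean (a ++ b) = pvClean a ++ pvClean b := by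
  simp [pvClean]

-- flushing the buffer is appending its cleaned singleton
theorem pv_flush_clean (buf : List Char) (out : List String) :
    pvFlushB buf out = out ++ pvClean [buf] := by
  unfold pvFlushB pvClean
  by_cases hv : PySem.Str.strip (String.ofList buf) = "" <;> simp [hv]

-- the first element surviving dropWhile fails the predicate
theorem pv_head_dropWhile {p : Char → Bool} {l : List Char} {c : Char} {t : List Char}
    (h : l.dropWhile p = c :: t) : p c = false := by
  induction l with
  | nil => simp [List.dropWhile] at h
  | cons x xs ih =>
    rw [List.dropWhile_cons] at h
    by_cases hx : p x = true
    · simp only [hx, if_true] at h; exact ih h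
    · simp only [hx] at h
      obtain ⟨rfl, -⟩ := List.cons.inj h
      exact Bool.eq_false_iff.mpr hx

-- Python's str.strip is idempotent (char-list level)
theorem pv_strip_idem (l : List Char) :
    PySem.Chars.strip (PySem.Chars.strip l) = PySem.Chars.strip l := by
  unfold PySem.Chars.strip PySem.Chars.rstrip PySem.Chars.lstrip
  set a := List.dropWhile PySem.Chars.isspace l with ha
  set b := (List.dropWhile PySem.Chars.isspace a.reverse).reverse with hb
  have hba : b <+: a := by
    rw [← List.reverse_suffix, hb, List.reverse_reverse]
    exact List.dropWhile_suffix _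
  have h1 : List.dropWhile PySem.Chars.isspace b = b := by
    cases hbe : b with
    | nil => simp
    | cons c t =>
      obtain ⟨r, hr⟩ := hba
      rw [hbe] at hr
      have hc : PySem.Chars.isspace c = false :=
        pv_head_dropWhile (l := l) (t := t ++ r)
          (by rw [← ha, ← List.cons_append]; exact hr.symm)
      simp [hc]
  rw [h1]
  rw [hb, List.reverse_reverse, List.dropWhile_idempotent, ← hb]

theorem pv_str_strip_idem (s : String) :
    PySem.Str.strip (PySem.Str.strip s) = PySem.Str.strip s := by
  apply String.toList_inj.mp
  rw [PySem.Str.toList_strip, PySem.Str.toList_strip, pv_strip_idem]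

-- the split worker's accumulator factors out
theorem pv_go_acc (sep : List Char) (fuel : Nat) :
    ∀ (l cur : List Char) (acc : List (List Char)),
      PySem.Chars.splitOn.go sep fuel l cur acc
        = acc.reverse ++ PySem.Chars.splitOn.go sep fuel l cur [] := by
  induction fuel with
  | zero => intro l cur acc; simp [PySem.Chars.splitOn.go]
  | succ n ih =>
    intro l cur acc
    cases l with
    | nil => simp [PySem.Chars.splitOn.go]
    | cons c rest =>
      simp only [PySem.Chars.splitOn.go]
      by_cases hp : sep.isPrefixOf (c :: rest) = true
      · simp only [hp, if_true]
        rw [ih (List.drop sep.length (c :: rest)) [] (cur.reverse :: acc),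
            ih (List.drop sep.length (c :: rest)) [] [cur.reverse]]
        simp
      · simp only [hp]
        exact ih rest (c :: cur) acc

-- B's scanner computes exactly the cleaned pieces of the split worker
theorem pv_scan_go (fuel : Nat) :
    ∀ (l buf : List Char) (out : List String), l.length + 1 ≤ fuel →
      pvScanB l buf out
        = out ++ pvClean (PySem.Chars.splitOn.go ("||".toList) fuel l buf.reverse []) := by
  induction fuel with
  | zero => intro l buf out h; omega
  | succ n ih =>
    intro l buf out h
    cases l with
    | nil =>
      simp only [pvScanB, PySem.Chars.splitOn.go, List.reverse_reverse,
        List.reverse_cons, List.reverse_nil, List.nil_append]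
      exact pv_flush_clean buf out
    | cons c rest =>
      simp only [pvScanB, PySem.Chars.splitOn.go]
      by_cases hp : ("||".toList).isPrefixOf (c :: rest) = true
      · simp only [hp, if_true, List.reverse_reverse]
        have hlen : ("||".toList).length = 2 := by decide
        have hdrop : List.drop ("||".toList).length (c :: rest) = rest.drop 1 := by
          rw [hlen]; rfl
        rw [hdrop, pv_go_acc]
        have hr : (rest.drop 1).length + 1 ≤ n := by
          simp only [List.length_cons] at h
          simp only [List.length_drop]
          omega
        rw [ih (rest.drop 1) [] (pvFlushB buf out) hr]
        simp only [List.reverse_nil, List.reverse_cons, List.nil_append]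
        rw [pvClean_append, pv_flush_clean, List.append_assoc]
      · simp only [hp, if_false, Bool.false_eq_true]
        have hr : rest.length + 1 ≤ n := by
          simp only [List.length_cons] at h; omega
        rw [ih rest (buf ++ [c]) out hr]
        simp

-- when the separator occurs nowhere, splitOn's worker never cuts
theorem pv_go_no_match (sep : List Char) (fuel : Nat) :
    ∀ (l cur : List Char) (acc : List (List Char)),
      (∀ j, ¬ sep <+: l.drop j) →
      PySem.Chars.splitOn.go sep fuel l cur acc = ((cur.reverse ++ l) :: acc).reverse := by
  induction fuel with
  | zero => intro l cur acc _; simp [PySem.Chars.splitOn.go]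
  | succ n ih =>
    intro l cur acc h
    cases l with
    | nil => simp [PySem.Chars.splitOn.go]
    | cons c rest =>
      have hp : sep.isPrefixOf (c :: rest) = false := by
        have h0 := h 0
        simp only [List.drop_zero] at h0
        exact Bool.eq_false_iff.mpr (fun hc => h0 (List.isPrefixOf_iff_prefix.mp hc))
      have h' : ∀ j, ¬ sep <+: rest.drop j := by
        intro j hj
        exact h (j + 1) (by simpa using hj)
      simp only [PySem.Chars.splitOn.go, hp, Bool.false_eq_true, if_false]
      rw [ih rest (c :: cur) acc h']
      simp

theorem pv_splitOn_no_match (l sep : List Char) (h : PySem.Chars.isIn sep l = false) :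
    PySem.Chars.splitOn l sep = [l] := by
  unfold PySem.Chars.splitOn
  rw [pv_go_no_match]
  · simp
  · intro j hj
    have hex : ∃ j, sep <+: List.drop j l := ⟨j, hj⟩
    rw [PySem.Chars.exists_prefix_drop_iff_isIn] at hex
    simp [h] at hex

-- A's filtered comprehension equals the clean normal form over the same split
theorem pv_A_clean (raw : String) :
    (((PySem.Str.split? raw "||").getD []).filter
        (fun s => PySem.Str.strip s != "")).map PySem.Str.strip
      = pvClean (PySem.Chars.splitOn raw.toList ("||".toList)) := by
  have hs : PySem.Str.split? raw "||"
      = some ((PySem.Chars.splitOn raw.toList ("||".toList)).map String.ofList) := by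
    unfold PySem.Str.split? PySem.Chars.split?
    rw [if_neg (by decide)]
    rfl
  rw [hs]
  simp only [Option.getD_some, pvClean]
  induction PySem.Chars.splitOn raw.toList ("||".toList) with
  | nil => rfl
  | cons x xs ihx =>
    by_cases hx : (PySem.Str.strip (String.ofList x) != "") = true <;>
      simp [hx, ihx]

-- B's scanner on a whole string equals the clean normal form
theorem pv_B_clean (raw : String) :
    pvScanB raw.toList [] [] = pvClean (PySem.Chars.splitOn raw.toList ("||".toList)) := by
  rw [pv_scan_go (raw.toList.length + 1) raw.toList [] [] (le_refl _)]
  rfl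

-- ===== VERDICT (by name: the statement is the Claim_ definition above) =====
theorem split_packed_py_spec : Claim_equal_split_packed_py := by
  intro source _
  cases source with
  | none => rfl
  | some src =>
    show split_packed_py (some src) = split_packed_py_alt (some src)
    simp only [split_packed_py, split_packed_py_alt]
    by_cases h0 : PySem.Str.strip src = ""
    · rw [if_pos h0, h0, pv_B_clean]
      decide
    · rw [if_neg h0, pv_B_clean]
      by_cases hin : PySem.Str.isIn "||" (PySem.Str.strip src) = true
      · rw [if_pos hin, pv_A_clean]
      · have hin' : PySem.Str.isIn "||" (PySem.Str.strip src) = false :=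
          Bool.eq_false_iff.mpr hin
        rw [if_neg hin]
        have := pv_splitOn_no_match (PySem.Str.strip src).toList ("||".toList)
          (by rw [← PySem.Str.isIn_eq]; exact hin')
        rw [this]
        simp only [pvClean, List.map_cons, List.map_nil]
        rw [String.ofList_toList, pv_str_strip_idem]
        simp [h0]
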